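-- pv_equiv track=rewrite | github.com/manwar/perlweeklychallenge-club | challenge-263/roger-bell-west/python/ch-2.py | mergeitems
-- ===== SOURCE A (Python) =====
-- from collections import defaultdict
--
-- def mergeitems(a, b):
--   c = defaultdict(lambda: 0)
--   for v in [a, b]:
--     for w in v:
--       c[w[0]] += w[1]
--   k = list(c.keys())
--   k.sort()
--   return [[i, c[i]] for i in k]
-- ===== SOURCE B (Python) =====
-- def mergeitems(a, b):
--   items = sorted(a + b, key=lambda w: w[0])
--   out = []
--   cur = None
--   for w in items:
--     if cur is not None and cur[0] == w[0]:
--       cur = [cur[0], cur[1] + w[1]]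
--     else:
--       if cur is not None:
--         out.append(cur)
--       cur = [w[0], w[1]]
--   if cur is not None:
--     out.append(cur)
--   return out
-- ===== Notes on version B (the rewrite author's own statement) =====
-- stated objective: alternative
-- what changed: Replaced A's defaultdict aggregation followed by sorting the key list with a sort of the concatenated pair list by key followed by a single linear pass that coalesces runs of equal keys.
import Mathlib
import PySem

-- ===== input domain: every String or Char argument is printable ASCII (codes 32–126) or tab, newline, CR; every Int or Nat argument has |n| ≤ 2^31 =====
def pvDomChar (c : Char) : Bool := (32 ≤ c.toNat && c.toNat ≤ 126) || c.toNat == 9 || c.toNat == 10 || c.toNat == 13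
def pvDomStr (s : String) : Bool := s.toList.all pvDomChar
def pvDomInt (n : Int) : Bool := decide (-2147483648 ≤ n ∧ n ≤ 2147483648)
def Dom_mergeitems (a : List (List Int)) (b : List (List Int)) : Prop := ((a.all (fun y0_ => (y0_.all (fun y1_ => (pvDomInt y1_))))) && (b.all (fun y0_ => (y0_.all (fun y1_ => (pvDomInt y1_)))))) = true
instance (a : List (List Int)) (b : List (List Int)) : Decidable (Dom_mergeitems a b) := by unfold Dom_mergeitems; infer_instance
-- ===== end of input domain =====

-- B replaces A's dict-aggregate-then-sort-keys strategy by sort-the-pairs-then-coalesce-runs (objective: alternative algorithm, same asymptotic cost).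

-- ===== PORT A =====
-- literal transliteration of A: defaultdict sum loop, keys, sort, comprehension.
-- w[0] / w[1] are ported as pyGetD with default 0, exact under Pre_mergeitems.
def mergeitems (a : List (List Int)) (b : List (List Int)) : List (List Int) :=
  let c : PySem.Dict Int Int :=
    [a, b].foldl (fun c v =>
      v.foldl (fun c w =>
        c.modify (PySem.List.pyGetD w 0 0) 0 (· + PySem.List.pyGetD w 1 0)) c)
      PySem.Dict.empty
  let k := PySem.List.sorted c.keys (fun x => x) false
  k.map (fun i => [i, c.getD i 0])

-- ===== PORT B =====
-- literal transliteration of Source B: sort a+b by key, one linear pass coalescing runs of equal keys.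
def mergeitems_alt (a : List (List Int)) (b : List (List Int)) : List (List Int) :=
  let items := PySem.List.sorted (a ++ b) (fun w => PySem.List.pyGetD w 0 0) false
  let st : List (List Int) × Option (Int × Int) :=
    items.foldl (fun st w =>
      match st.2 with
      | some (ck, cv) =>
          if ck == PySem.List.pyGetD w 0 0 then
            (st.1, some (ck, cv + PySem.List.pyGetD w 1 0))
          else
            (st.1 ++ [[ck, cv]], some (PySem.List.pyGetD w 0 0, PySem.List.pyGetD w 1 0))
      | none => (st.1, some (PySem.List.pyGetD w 0 0, PySem.List.pyGetD w 1 0)))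
      ([], none)
  match st.2 with
  | some (ck, cv) => st.1 ++ [[ck, cv]]
  | none => st.1

-- ===== PRECONDITION & SPEC =====
-- Pre_ excludes exactly the inputs on which Python A raises IndexError (an inner list shorter than 2).
def Pre_mergeitems (a : List (List Int)) (b : List (List Int)) : Prop :=
  (∀ w ∈ a, 2 ≤ w.length) ∧ (∀ w ∈ b, 2 ≤ w.length)
instance (a : List (List Int)) (b : List (List Int)) : Decidable (Pre_mergeitems a b) := by
  unfold Pre_mergeitems; infer_instance
def pvWitness_mergeitems : List (List Int) × List (List Int) := ([[1, 2], [3, 4]], [[1, 5]])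

def Spec_mergeitems (a : List (List Int)) (b : List (List Int)) (out : List (List Int)) : Prop := out = mergeitems_alt a b
instance (a : List (List Int)) (b : List (List Int)) (out : List (List Int)) : Decidable (Spec_mergeitems a b out) := by unfold Spec_mergeitems; infer_instance

-- ===== CLAIM (what is proved, stated in full; the proofs are below) =====
def Claim_equal_mergeitems : Prop := ∀ (a : List (List Int)) (b : List (List Int)), Dom_mergeitems a b → Pre_mergeitems a b → Spec_mergeitems a b (mergeitems a b)

-- ===== LEMMAS AND PROOFS =====

-- key and value of an item
def pvK (w : List Int) : Int := PySem.List.pyGetD w 0 0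
def pvV (w : List Int) : Int := PySem.List.pyGetD w 1 0
-- total value carried by key q in l
def pvS (l : List (List Int)) (q : Int) : Int := ((l.filter (fun w => pvK w == q)).map pvV).sum
-- first occurrences of a list of keys
def pvUK : List Int → List Int
  | [] => []
  | x :: xs => x :: pvUK (xs.filter (· ≠ x))
  termination_by l => l.length
  decreasing_by
    simp
    exact le_trans (List.length_filter_le _ _) (le_of_eq List.length_attach)

theorem mem_pvUK : ∀ (l : List Int) (q : Int), q ∈ pvUK l ↔ q ∈ l
  | [], q => by rw [pvUK]
  | x :: xs, q => by
    rw [pvUK]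
    have ih := mem_pvUK (xs.filter (· ≠ x)) q
    simp only [List.mem_cons, ih, List.mem_filter, decide_eq_true_eq]
    by_cases h : q = x <;> simp [h]
  termination_by l => l.length
  decreasing_by
    simp
    exact List.length_filter_le _ _

theorem nodup_pvUK : ∀ (l : List Int), (pvUK l).Nodup
  | [] => by rw [pvUK]; simp
  | x :: xs => by
    rw [pvUK]
    refine List.nodup_cons.mpr ⟨?_, nodup_pvUK (xs.filter (· ≠ x))⟩
    rw [mem_pvUK]
    simp
  termination_by l => l.length
  decreasing_by
    simp
    exact List.length_filter_le _ _

theorem pairwise_lt_pvUK : ∀ (l : List Int), l.Pairwise (· ≤ ·) → (pvUK l).Pairwise (· < ·)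
  | [], _ => by rw [pvUK]; simp
  | x :: xs, h => by
    rw [pvUK]
    rcases List.pairwise_cons.mp h with ⟨hx, hxs⟩
    refine List.pairwise_cons.mpr ⟨?_, pairwise_lt_pvUK (xs.filter (· ≠ x)) (List.Pairwise.filter _ hxs)⟩
    intro q hq
    rw [mem_pvUK, List.mem_filter] at hq
    simp only [decide_eq_true_eq] at hq
    rcases hq with ⟨hmem, hne⟩
    have := hx q hmem
    omega
  termination_by l => l.length
  decreasing_by
    simp
    exact List.length_filter_le _ _

theorem pvS_nil (q : Int) : pvS [] q = 0 := rfl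

theorem pvS_cons (w : List Int) (t : List (List Int)) (q : Int) :
    pvS (w :: t) q = if pvK w = q then pvV w + pvS t q else pvS t q := by
  simp only [pvS, List.filter_cons]
  by_cases h : pvK w = q
  · simp [h]
  · simp [h]

theorem pvS_eq_zero_of_forall_ne (t : List (List Int)) (q : Int)
    (h : ∀ w ∈ t, pvK w ≠ q) : pvS t q = 0 := by
  have : t.filter (fun w => pvK w == q) = [] := by
    rw [List.filter_eq_nil_iff]; intro w hw; simpa using h w hw
  simp [pvS, this]

-- the canonical merged result
def pvCanon (l : List (List Int)) : List (List Int) :=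
  (PySem.List.sorted (PySem.Set.ofList (l.map pvK)) (fun x => x) false).map (fun q => [q, pvS l q])

-- ---------- A side ----------

theorem getD_fold_sum (l : List (List Int)) (d : PySem.Dict Int Int) (q : Int) :
    (l.foldl (fun c w => c.modify (pvK w) 0 (· + pvV w)) d).getD q 0 = d.getD q 0 + pvS l q := by
  induction l generalizing d with
  | nil => simp [pvS_nil]
  | cons w t ih =>
    simp only [List.foldl_cons, ih, PySem.Dict.getD_modify, pvS_cons]
    by_cases h : q = pvK w
    · rw [if_pos h, if_pos h.symm, h]; omega
    · rw [if_neg h, if_neg (fun e => h e.symm)]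

theorem mergeitems_eq_canon (a b : List (List Int)) : mergeitems a b = pvCanon (a ++ b) := by
  have hA : mergeitems a b = (PySem.List.sorted
      (((a ++ b).foldl (fun c w => c.modify (pvK w) 0 (· + pvV w)) PySem.Dict.empty).keys)
      (fun x => x) false).map
      (fun i => [i, ((a ++ b).foldl (fun c w => c.modify (pvK w) 0 (· + pvV w)) PySem.Dict.empty).getD i 0]) := by
    simp only [mergeitems, List.foldl_cons, List.foldl_nil, ← List.foldl_append]
    rfl
  rw [hA]
  have hkeys : ((a ++ b).foldl (fun c w => c.modify (pvK w) 0 (· + pvV w)) PySem.Dict.empty).keys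
      = PySem.Set.ofList ((a ++ b).map pvK) := by
    rw [PySem.Dict.keys_foldl_modify_key (a ++ b) pvK 0 (fun _ w => (· + pvV w)) PySem.Dict.empty]
    rw [PySem.Dict.keys_empty, PySem.Set.ofList_eq_foldl]
    rfl
  rw [hkeys, pvCanon]
  apply List.map_congr_left
  intro q _
  rw [getD_fold_sum, PySem.Dict.getD_empty, zero_add]

-- ---------- B side ----------

def pvStep (st : List (List Int) × Option (Int × Int)) (w : List Int) :
    List (List Int) × Option (Int × Int) :=
  match st.2 with
  | some (ck, cv) =>
      if ck == pvK w then (st.1, some (ck, cv + pvV w))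
      else (st.1 ++ [[ck, cv]], some (pvK w, pvV w))
  | none => (st.1, some (pvK w, pvV w))

def pvFin (st : List (List Int) × Option (Int × Int)) : List (List Int) :=
  match st.2 with
  | some (ck, cv) => st.1 ++ [[ck, cv]]
  | none => st.1

theorem scan_go (l : List (List Int)) : ∀ (out : List (List Int)) (ck cv : Int),
    (∀ w ∈ l, ck ≤ pvK w) → (l.map pvK).Pairwise (· ≤ ·) →
    pvFin (l.foldl pvStep (out, some (ck, cv)))
      = out ++ [ck, cv + pvS l ck] :: (pvUK ((l.map pvK).filter (· ≠ ck))).map (fun q => [q, pvS l q]) := by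
  induction l with
  | nil =>
    intro out ck cv _ _
    simp only [List.foldl_nil, List.map_nil, List.filter_nil, pvFin, pvS_nil, add_zero]
    rw [pvUK]
    simp
  | cons w t ih =>
    intro out ck cv hle hpw
    simp only [List.map_cons, List.pairwise_cons] at hpw
    rcases hpw with ⟨hw, hpt⟩
    by_cases h : ck = pvK w
    · have : pvFin ((w :: t).foldl pvStep (out, some (ck, cv)))
          = pvFin (t.foldl pvStep (out, some (ck, cv + pvV w))) := by
        simp [pvStep, h]
      rw [this, ih out ck (cv + pvV w)
        (fun x hx => le_trans (le_of_eq h) (hw (pvK x) (List.mem_map_of_mem hx))) hpt]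
      have hfil : (pvK w :: t.map pvK).filter (· ≠ ck) = (t.map pvK).filter (· ≠ ck) := by
        simp [h]
      rw [List.map_cons, hfil, pvS_cons, if_pos h.symm]
      congr 2
      · exact (add_assoc cv (pvV w) (pvS t ck)).symm ▸ rfl
      · apply List.map_congr_left
        intro q hq
        rw [mem_pvUK] at hq
        simp only [List.mem_filter, decide_eq_true_eq] at hq
        have hne : pvK w ≠ q := fun e => hq.2 (by rw [← e, ← h])
        rw [pvS_cons, if_neg hne]
    · have hlt : ck < pvK w := lt_of_le_of_ne (hle w (by simp)) h
      have : pvFin ((w :: t).foldl pvStep (out, some (ck, cv)))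
          = pvFin (t.foldl pvStep (out ++ [[ck, cv]], some (pvK w, pvV w))) := by
        simp [pvStep, h]
      rw [this, ih (out ++ [[ck, cv]]) (pvK w) (pvV w) (fun x hx => hw (pvK x) (List.mem_map_of_mem hx)) hpt]
      have htgt : ∀ x ∈ t, pvK x ≠ ck := by
        intro x hx
        have := hw (pvK x) (List.mem_map_of_mem hx)
        omega
      have hfil : (pvK w :: t.map pvK).filter (· ≠ ck) = pvK w :: t.map pvK := by
        rw [List.filter_eq_self]
        intro x hx
        simp only [List.mem_cons] at hx
        simp only [decide_eq_true_eq]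
        rcases hx with rfl | hx
        · exact fun e => h e.symm
        · rcases List.mem_map.mp hx with ⟨y, hy, rfl⟩
          exact htgt y hy
      rw [List.map_cons, hfil, pvUK, List.map_cons]
      have hS0 : pvS (w :: t) ck = 0 := by
        rw [pvS_cons, if_neg (fun e => h e.symm), pvS_eq_zero_of_forall_ne t ck htgt]
      rw [hS0, pvS_cons, if_pos rfl]
      simp only [List.append_assoc, List.cons_append, List.nil_append, add_zero]
      congr 3
      apply List.map_congr_left
      intro q hq
      rw [mem_pvUK] at hq
      simp only [List.mem_filter, decide_eq_true_eq] at hq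
      have hne : pvK w ≠ q := fun e => hq.2 e.symm
      rw [pvS_cons, if_neg hne]

theorem scan_sorted (l : List (List Int)) (hpw : (l.map pvK).Pairwise (· ≤ ·)) :
    pvFin (l.foldl pvStep ([], none))
      = (pvUK (l.map pvK)).map (fun q => [q, pvS l q]) := by
  cases l with
  | nil =>
    simp only [List.map_nil]
    rw [pvUK]
    simp [pvFin]
  | cons w t =>
    simp only [List.map_cons, List.pairwise_cons] at hpw
    rcases hpw with ⟨hw, hpt⟩
    have : (w :: t).foldl pvStep ([], none) = t.foldl pvStep ([], some (pvK w, pvV w)) := by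
      simp [pvStep]
    rw [this, scan_go t [] (pvK w) (pvV w) (fun x hx => hw (pvK x) (List.mem_map_of_mem hx)) hpt]
    rw [List.map_cons, pvUK, List.map_cons]
    rw [pvS_cons, if_pos rfl]
    simp only [List.nil_append]
    congr 1
    apply List.map_congr_left
    intro q hq
    rw [mem_pvUK] at hq
    simp only [List.mem_filter, decide_eq_true_eq] at hq
    have hne : pvK w ≠ q := fun e => hq.2 e.symm
    rw [pvS_cons, if_neg hne]

theorem mergeitems_alt_eq_canon (a b : List (List Int)) : mergeitems_alt a b = pvCanon (a ++ b) := by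
  have hstep : mergeitems_alt a b
      = pvFin ((PySem.List.sorted (a ++ b) pvK false).foldl pvStep ([], none)) := rfl
  set items := PySem.List.sorted (a ++ b) pvK false with hitems
  have hperm : items.Perm (a ++ b) := PySem.List.sorted_perm _ _ _
  have hpw : (items.map pvK).Pairwise (· ≤ ·) := PySem.List.sorted_map_key_pairwise _ _
  rw [hstep, scan_sorted items hpw]
  -- keys agree
  have hkperm : (items.map pvK).Perm ((a ++ b).map pvK) := hperm.map pvK
  have hkeys : pvUK (items.map pvK) = PySem.List.sorted (PySem.Set.ofList ((a ++ b).map pvK)) (fun x => x) false := by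
    refine (PySem.List.sorted_eq_of_perm_of_pairwise_lt _ _ _ ?_ (pairwise_lt_pvUK _ hpw)).symm
    refine (List.perm_ext_iff_of_nodup (nodup_pvUK _) (PySem.Set.nodup_ofList _)).mpr ?_
    intro q
    rw [mem_pvUK, PySem.Set.mem_ofList]
    exact hkperm.mem_iff
  -- sums agree
  have hsum : ∀ q, pvS items q = pvS (a ++ b) q := by
    intro q
    exact List.Perm.sum_eq ((hperm.filter _).map pvV)
  rw [hkeys, pvCanon]
  apply List.map_congr_left
  intro q _
  rw [hsum]

-- ===== VERDICT (by name: the statement is the Claim_ definition above) =====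
theorem mergeitems_spec : Claim_equal_mergeitems := by
  intro a b _ _
  show mergeitems a b = mergeitems_alt a b
  rw [mergeitems_eq_canon, mergeitems_alt_eq_canon]
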